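-- pv_equiv track=rewrite | github.com/AshishHoodaIITD/competitive_coding | cdf649/a.py | findFromStart
-- ===== SOURCE A (Python) =====
-- def findFromStart(arr,x):
--     currSum = 0
--     max_size = 0
--     for i in range(len(arr)):
--         currSum += arr[i]
--         if currSum%x != 0:
--             max_size = max(max_size, i+1)
--     return max_size
-- ===== SOURCE B (Python) =====
-- def findFromStart(arr, x):
--     # precompute all prefix sums, then scan from the end for the first
--     # (i.e. largest) index whose prefix sum is not divisible by x
--     pre = []
--     s = 0
--     for v in arr:
--         s += v
--         pre.append(s)
--     i = len(pre) - 1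
--     while i >= 0:
--         if pre[i] % x != 0:
--             return i + 1
--         i -= 1
--     return 0
-- ===== Notes on version B (the rewrite author's own statement) =====
-- stated objective: alternative
-- what changed: The forward loop that tracks a running maximum of qualifying indices is replaced by precomputing the full prefix-sum list and then scanning it from the back, returning i+1 at the first prefix sum not divisible by x (early return).
import Mathlib
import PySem

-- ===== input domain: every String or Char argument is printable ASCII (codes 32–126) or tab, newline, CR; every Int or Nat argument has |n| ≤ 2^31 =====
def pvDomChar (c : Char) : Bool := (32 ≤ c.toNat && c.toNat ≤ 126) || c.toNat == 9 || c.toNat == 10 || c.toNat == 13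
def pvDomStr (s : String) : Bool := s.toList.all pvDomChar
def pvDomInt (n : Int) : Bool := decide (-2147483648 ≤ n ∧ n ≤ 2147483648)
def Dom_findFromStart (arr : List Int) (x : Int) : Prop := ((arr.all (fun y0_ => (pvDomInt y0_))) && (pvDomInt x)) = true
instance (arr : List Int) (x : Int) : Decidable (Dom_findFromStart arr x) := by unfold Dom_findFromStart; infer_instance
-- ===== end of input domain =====

-- B replaces A's forward running-max loop by precomputing the prefix-sum list and
-- scanning it from the back with an early return (alternative decomposition, same cost).

-- ===== PORT A =====
-- for i in range(len(arr)) with arr[i] is ported as a fold over enumerate arr;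
-- state = (currSum, max_size)
def findFromStart (arr : List Int) (x : Int) : Int :=
  ((PySem.List.enumerate arr).foldl
    (fun (st : Int × Int) p =>
      let c := st.1 + p.2
      if PySem.Int.mod c x ≠ 0 then (c, max st.2 (p.1 + 1)) else (c, st.2))
    (0, 0)).2

-- ===== PORT B =====
-- the prefix-building loop of Source B
def pvPrefixSums (arr : List Int) : List Int :=
  (arr.foldl (fun (p : List Int × Int) v => (p.1 ++ [p.2 + v], p.2 + v)) ([], (0 : Int))).1

-- the backwards index loop of Source B: recursion on the reversed prefix list;
-- rest.length is exactly the Python index i of the head element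
def pvRevFind (x : Int) : List Int → Int
  | [] => 0
  | s :: rest => if PySem.Int.mod s x ≠ 0 then (rest.length : Int) + 1 else pvRevFind x rest

def findFromStart_alt (arr : List Int) (x : Int) : Int :=
  pvRevFind x (pvPrefixSums arr).reverse

-- ===== PRECONDITION & SPEC =====
-- Pre_ excludes exactly the inputs where Python A raises ZeroDivisionError:
-- x = 0 with a nonempty arr (with arr = [] the loop body never runs and A returns 0).
def Pre_findFromStart (arr : List Int) (x : Int) : Prop := arr = [] ∨ x ≠ 0
instance (arr : List Int) (x : Int) : Decidable (Pre_findFromStart arr x) := by unfold Pre_findFromStart; infer_instance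
def pvWitness_findFromStart : List Int × Int := ([1, 2, 3], 2)

def Spec_findFromStart (arr : List Int) (x : Int) (out : Int) : Prop := out = findFromStart_alt arr x
instance (arr : List Int) (x : Int) (out : Int) : Decidable (Spec_findFromStart arr x out) := by unfold Spec_findFromStart; infer_instance

-- ===== CLAIM (what is proved, stated in full; the proofs are below) =====
def Claim_equal_findFromStart : Prop := ∀ (arr : List Int) (x : Int), Dom_findFromStart arr x → Pre_findFromStart arr x → Spec_findFromStart arr x (findFromStart arr x)

-- ===== LEMMAS AND PROOFS =====

-- proof-only spec of the prefix list built by Source B's first loop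
def pvPreFrom (s : Int) : List Int → List Int
  | [] => []
  | v :: t => (s + v) :: pvPreFrom (s + v) t

theorem pvPrefix_fold (arr : List Int) : ∀ (l : List Int) (s : Int),
    arr.foldl (fun (p : List Int × Int) v => (p.1 ++ [p.2 + v], p.2 + v)) (l, s)
      = (l ++ pvPreFrom s arr, s + arr.sum) := by
  induction arr with
  | nil => intro l s; simp [pvPreFrom]
  | cons v t ih =>
      intro l s
      simp only [List.foldl_cons, ih, pvPreFrom, List.sum_cons, Prod.mk.injEq]
      exact ⟨by simp, by ring⟩

theorem pvPrefixSums_eq (arr : List Int) : pvPrefixSums arr = pvPreFrom 0 arr := by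
  simp [pvPrefixSums, pvPrefix_fold]

theorem pvPreFrom_length (l : List Int) : ∀ s, (pvPreFrom s l).length = l.length := by
  induction l with
  | nil => intro s; rfl
  | cons v t ih => intro s; simp [pvPreFrom, ih]

theorem pvPreFrom_append (ys : List Int) : ∀ (s a : Int),
    pvPreFrom s (ys ++ [a]) = pvPreFrom s ys ++ [s + ys.sum + a] := by
  induction ys with
  | nil => intro s a; simp [pvPreFrom]
  | cons v t ih =>
      intro s a
      simp only [List.cons_append, pvPreFrom, ih, List.sum_cons, List.cons.injEq]
      exact ⟨trivial, by ring_nf⟩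

theorem pvRevFind_le (x : Int) (l : List Int) : pvRevFind x l ≤ (l.length : Int) := by
  induction l with
  | nil => simp [pvRevFind]
  | cons s rest ih =>
      simp only [pvRevFind, List.length_cons]
      split_ifs
      · push_cast; omega
      · push_cast at ih ⊢; omega

-- A's fold computes the total sum and B's reverse-search value
theorem pvFold_char (arr : List Int) (x : Int) :
    (PySem.List.enumerate arr).foldl
      (fun (st : Int × Int) p =>
        let c := st.1 + p.2
        if PySem.Int.mod c x ≠ 0 then (c, max st.2 (p.1 + 1)) else (c, st.2))
      (0, 0)
    = (arr.sum, pvRevFind x (pvPreFrom 0 arr).reverse) := by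
  induction arr using List.reverseRecOn with
  | nil => simp [pvPreFrom, pvRevFind]
  | append_singleton ys a ih =>
      rw [PySem.List.enumerate_append, List.foldl_append, ih]
      have hlen : ((pvPreFrom 0 ys).reverse.length : Int) = (ys.length : Int) := by
        rw [List.length_reverse, pvPreFrom_length]
      have hle := pvRevFind_le x (pvPreFrom 0 ys).reverse
      rw [hlen] at hle
      simp only [PySem.List.enumerate_cons, PySem.List.enumerate_nil, List.foldl_cons,
        List.foldl_nil, pvPreFrom_append, List.reverse_append, List.reverse_singleton,
        List.singleton_append, pvRevFind, List.sum_append, List.sum_cons, List.sum_nil,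
        List.length_reverse, pvPreFrom_length, zero_add, add_zero]
      split_ifs with h
      · simp only [Prod.mk.injEq]
        exact ⟨trivial, by omega⟩
      · rfl

-- ===== VERDICT (by name: the statement is the Claim_ definition above) =====
theorem findFromStart_spec : Claim_equal_findFromStart := by
  intro arr x _ _
  unfold Spec_findFromStart findFromStart findFromStart_alt
  rw [pvFold_char, pvPrefixSums_eq]
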